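-- pv_equiv track=rewrite | github.com/Meir-Neustadt/Meir.py | ProfitFinder.py | Expensive
-- ===== SOURCE A (Python) =====
-- def Expensive(a,i):
--     ME=a[i]
--     Day=i
--     for i in range(i+1,len(a)):
--         if a[i]>=ME:
--            ME=a[i]
--            Day=i
--     return (ME,Day)
-- ===== SOURCE B (Python) =====
-- def Expensive(a, i):
--     # Two-pass form: reduce to the tail maximum, then search backwards
--     # for its last occurrence (the >= tie-break of the original).
--     m = max(a[i:])
--     for j in range(len(a) - 1, i - 1, -1):
--         if a[j] == m:
--             return (m, j)
-- ===== Notes on version B (the rewrite author's own statement) =====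
-- stated objective: simpler
-- what changed: Replaces the single fused scan carrying a running (max, day) state with two stateless passes: a max() reduction over the tail followed by a backward search for the last index equal to it.
-- outside the precondition, e.g. on Expensive([5, 1], -1): A returns (5, 0), B returns (1, 1)
import Mathlib
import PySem

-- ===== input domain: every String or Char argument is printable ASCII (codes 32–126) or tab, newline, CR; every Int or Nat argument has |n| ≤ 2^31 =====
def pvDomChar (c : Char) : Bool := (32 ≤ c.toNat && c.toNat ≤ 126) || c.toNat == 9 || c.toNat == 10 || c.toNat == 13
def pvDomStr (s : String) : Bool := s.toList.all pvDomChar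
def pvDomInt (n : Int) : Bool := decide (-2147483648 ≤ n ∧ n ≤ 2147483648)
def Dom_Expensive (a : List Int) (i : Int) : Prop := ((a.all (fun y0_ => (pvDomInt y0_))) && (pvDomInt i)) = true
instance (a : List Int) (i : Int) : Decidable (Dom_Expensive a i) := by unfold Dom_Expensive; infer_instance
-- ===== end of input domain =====

-- B replaces A's fused running-(max,day) scan by a max() reduction over the tail
-- plus a backward search for its last occurrence (objective: simpler).

-- ===== PORT A =====
-- one loop step of A: 'if a[j] >= ME: ME = a[j]; Day = j'
def pvStep (a : List Int) (st : Int × Int) (j : Int) : Int × Int :=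
  if PySem.List.pyGetD a j 0 ≥ st.1 then (PySem.List.pyGetD a j 0, j) else st

def Expensive (a : List Int) (i : Int) : Int × Int :=
  let me := PySem.List.pyGetD a i 0
  let day := i
  (PySem.List.pyRange (i + 1) (a.length : Int) 1).foldl (pvStep a) (me, day)

-- ===== PORT B =====
def Expensive_alt (a : List Int) (i : Int) : Int × Int :=
  let m := (PySem.List.max? (PySem.List.slice a (some i) none) (fun y => y)).getD 0
  match (PySem.List.pyRange ((a.length : Int) - 1) (i - 1) (-1)).find?
      (fun j => PySem.List.pyGetD a j 0 == m) with
  | some j => (m, j)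
  | none => (m, i)   -- unreachable under Pre_ (the maximum occurs in the scanned range); totality default

-- ===== PRECONDITION & SPEC =====
-- Pre_ restricts to the natural day-index domain 0 ≤ i < len(a): i ≥ len(a) (and i < -len(a))
-- raise IndexError in A, and negative in-range i lies outside the task's domain — A's
-- negative-index wraparound rescans the whole list there.
def Pre_Expensive (a : List Int) (i : Int) : Prop := 0 ≤ i ∧ i < (a.length : Int)
instance (a : List Int) (i : Int) : Decidable (Pre_Expensive a i) := by unfold Pre_Expensive; infer_instance
def pvWitness_Expensive : List Int × Int := ([3, 7, 7, 2], 1)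

def Spec_Expensive (a : List Int) (i : Int) (out : Int × Int) : Prop := out = Expensive_alt a i
instance (a : List Int) (i : Int) (out : Int × Int) : Decidable (Spec_Expensive a i out) := by unfold Spec_Expensive; infer_instance

-- ===== CLAIM (what is proved, stated in full; the proofs are below) =====
def Claim_equal_Expensive : Prop := ∀ (a : List Int) (i : Int), Dom_Expensive a i → Pre_Expensive a i → Spec_Expensive a i (Expensive a i)


-- ===== LEMMAS AND PROOFS =====

-- find? over a reversed list is the last match
theorem pv_find?_reverse {α : Type} (p : α → Bool) (l : List α) :
    l.reverse.find? p = (l.filter p).getLast? := by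
  induction l with
  | nil => rfl
  | cons x t ih =>
    rw [List.reverse_cons, List.find?_append, ih, List.filter_cons]
    cases hx : p x
    · simp [hx]
    · cases hfl : t.filter p
      · simp [hx]
      · simp [hx, List.getLast?_cons]

-- A's loop invariant: over any index list the state becomes the running max
-- together with the last index attaining it (>= tie-break), defaulting to day.
theorem pv_fold_char (a : List Int) (l : List Int) (me day : Int) :
    l.foldl (pvStep a) (me, day) =
      ((l.foldl (fun acc j => max acc (PySem.List.pyGetD a j 0)) me),
       ((l.filter (fun j => PySem.List.pyGetD a j 0 ==
          l.foldl (fun acc j => max acc (PySem.List.pyGetD a j 0)) me)).getLast?.getD day)) := by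
  induction l using List.reverseRecOn with
  | nil => simp
  | append_singleton l j ih =>
    simp only [List.foldl_append, List.filter_append, List.foldl_cons, List.foldl_nil,
      List.filter_cons, List.filter_nil]
    rw [ih]
    by_cases h : PySem.List.pyGetD a j 0 ≥
        l.foldl (fun acc j => max acc (PySem.List.pyGetD a j 0)) me
    · have hmax : max (l.foldl (fun acc j => max acc (PySem.List.pyGetD a j 0)) me)
          (PySem.List.pyGetD a j 0) = PySem.List.pyGetD a j 0 := max_eq_right h
      simp [pvStep, h]
    · have hlt : PySem.List.pyGetD a j 0 <
          l.foldl (fun acc j => max acc (PySem.List.pyGetD a j 0)) me := lt_of_not_ge h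
      have hmax : max (l.foldl (fun acc j => max acc (PySem.List.pyGetD a j 0)) me)
          (PySem.List.pyGetD a j 0) = l.foldl (fun acc j => max acc (PySem.List.pyGetD a j 0)) me :=
        max_eq_left (le_of_lt hlt)
      simp [pvStep, h, hmax, ne_of_lt hlt]

-- ===== VERDICT (by name: the statement is the Claim_ definition above) =====
theorem Expensive_spec : Claim_equal_Expensive := by
  intro a i _ hpre
  obtain ⟨h0, hlt⟩ := hpre
  have hiN : i.toNat < a.length := by omega
  have hiI : (i.toNat : Int) = i := Int.toNat_of_nonneg h0
  unfold Spec_Expensive Expensive Expensive_alt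
  have hget : PySem.List.pyGetD a i 0 = a[i.toNat] :=
    PySem.List.pyGetD_eq_getElem a 0 h0 hlt
  -- B's maximum equals A's running maximum
  have hdrop : a.drop i.toNat = a[i.toNat] :: a.drop (i.toNat + 1) :=
    List.drop_eq_getElem_cons hiN
  have hslice : PySem.List.slice a (some i) none = a.drop i.toNat :=
    PySem.List.slice_from a h0
  have hm : (PySem.List.max? (PySem.List.slice a (some i) none) (fun y => y)).getD 0
      = (a.drop (i.toNat + 1)).foldl max a[i.toNat] := by
    rw [hslice, hdrop, PySem.List.max?_id_cons]
    rfl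
  have hMx : (PySem.List.pyRange (i + 1) (a.length : Int) 1).foldl
        (fun acc j => max acc (PySem.List.pyGetD a j 0)) (PySem.List.pyGetD a i 0)
      = (a.drop (i.toNat + 1)).foldl max a[i.toNat] := by
    rw [PySem.List.foldl_pyRange_pyGetD' a 0 max (PySem.List.pyGetD a i 0) (by omega : (0:Int) ≤ i + 1), hget]
    have : (i + 1).toNat = i.toNat + 1 := by omega
    rw [this]
  set m : Int := (a.drop (i.toNat + 1)).foldl max a[i.toNat] with hmdef
  -- rewrite both sides
  rw [pv_fold_char, hMx, hm]
  have hrev : PySem.List.pyRange ((a.length : Int) - 1) (i - 1) (-1)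
      = (PySem.List.pyRange i (a.length : Int) 1).reverse := by
    rw [PySem.List.pyRange_neg_one_eq_reverse]
    norm_num
  simp only [hrev, pv_find?_reverse, PySem.List.pyRange_one_cons hlt, List.filter_cons]
  cases hF : (PySem.List.pyRange (i + 1) (a.length : Int) 1).filter
      (fun j => PySem.List.pyGetD a j 0 == m) with
  | cons y ys =>
      cases hpi : (PySem.List.pyGetD a i 0 == m) <;>
        simp [List.getLast?_cons]
  | nil =>
      -- the maximum of the tail occurs at index i itself
      have hmem : m ∈ a.drop i.toNat := by
        apply PySem.List.max?_mem (key := fun y => y)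
        rw [hdrop, PySem.List.max?_id_cons, hmdef]
      obtain ⟨k, hk, hke⟩ := List.mem_iff_getElem.mp hmem
      have hklen : i.toNat + k < a.length := by
        have := hk; simp [List.length_drop] at this; omega
      have hkv : a[i.toNat + k] = m := by
        rw [← hke]; rw [List.getElem_drop]
      cases k with
      | zero =>
          have hpi : (PySem.List.pyGetD a i 0 == m) = true := by
            rw [hget]; simpa using hkv
          simp [hpi]
      | succ k' =>
          exfalso
          have hj : ((i.toNat + (k' + 1) : Nat) : Int) ∈
              PySem.List.pyRange (i + 1) (a.length : Int) 1 := by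
            rw [PySem.List.mem_pyRange_one]
            push_cast
            omega
          have hpj : (PySem.List.pyGetD a ((i.toNat + (k' + 1) : Nat) : Int) 0 == m) = true := by
            have : PySem.List.pyGetD a ((i.toNat + (k' + 1) : Nat) : Int) 0
                = a[i.toNat + (k' + 1)] := by
              rw [PySem.List.pyGetD_eq_getElem a 0 (by omega) (by push_cast; omega)]
              simp only [Int.toNat_natCast]
            rw [this, hkv]
            simp
          have : ((i.toNat + (k' + 1) : Nat) : Int) ∈
              (PySem.List.pyRange (i + 1) (a.length : Int) 1).filter
                (fun j => PySem.List.pyGetD a j 0 == m) :=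
            List.mem_filter.mpr ⟨hj, hpj⟩
          rw [hF] at this
          exact absurd this (List.not_mem_nil)
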